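-- pv_equiv track=rewrite | github.com/Azure/ai-infrastructure-on-azure | tools/ai-infrastructure-mcp/ai_infrastructure_mcp/tools/command_wrapper.py | parse_parallel_ssh_output
-- ===== SOURCE A (Python) =====
-- from typing import List, Dict, Any, Optional
--
-- def parse_parallel_ssh_output(output: str) -> Dict[str, List[str]]:
--     """Parse output from `parallel-ssh -i` collecting per-host lines.
--
--     Format expected (subset):
--         [1] 12:00:00 [SUCCESS] hostA
--         line1
--         line2
--         [2] 12:00:00 [SUCCESS] hostB
--
--     Returns mapping host -> list of (non-empty) lines.
--     """
--     result: Dict[str, List[str]] = {}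
--     current_host: Optional[str] = None
--     for line in output.splitlines():
--         ls = line.strip()
--         if not ls:
--             continue
--         if ls.startswith('[') and 'SUCCESS' in ls:
--             parts = ls.split()
--             if parts:
--                 host = parts[-1]
--                 current_host = host
--                 result.setdefault(host, [])
--             continue
--         if current_host and not ls.startswith('['):
--             result[current_host].append(ls)
--     return result
-- ===== SOURCE B (Python) =====
-- def _is_header(ls):
--     return ls.startswith('[') and 'SUCCESS' in ls
--
--
-- def parse_parallel_ssh_output(output):
--     """Segment-at-a-time parser: pre-strip the lines, then consume one
--     header-delimited segment per outer iteration, merging each segment's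
--     body into the result in one extend."""
--     lines = [ls for ls in (line.strip() for line in output.splitlines()) if ls]
--     result = {}
--     rest = lines
--     while rest:
--         if not _is_header(rest[0]):
--             # ignore lines before the next header
--             rest = rest[1:]
--             continue
--         host = rest[0].split()[-1]
--         result.setdefault(host, [])
--         rest = rest[1:]
--         body = []
--         while rest and not _is_header(rest[0]):
--             if not rest[0].startswith('['):
--                 body.append(rest[0])
--             rest = rest[1:]
--         result[host].extend(body)
--     return result
-- ===== Notes on version B (the rewrite author's own statement) =====
-- stated objective: alternative
-- what changed: Replaces A's single-pass state machine threading a current_host accumulator with a pre-stripping pass followed by segment-at-a-time grouping: each outer step consumes one whole header-delimited segment (inner loop) and merges its body with one extend.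
import Mathlib
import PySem

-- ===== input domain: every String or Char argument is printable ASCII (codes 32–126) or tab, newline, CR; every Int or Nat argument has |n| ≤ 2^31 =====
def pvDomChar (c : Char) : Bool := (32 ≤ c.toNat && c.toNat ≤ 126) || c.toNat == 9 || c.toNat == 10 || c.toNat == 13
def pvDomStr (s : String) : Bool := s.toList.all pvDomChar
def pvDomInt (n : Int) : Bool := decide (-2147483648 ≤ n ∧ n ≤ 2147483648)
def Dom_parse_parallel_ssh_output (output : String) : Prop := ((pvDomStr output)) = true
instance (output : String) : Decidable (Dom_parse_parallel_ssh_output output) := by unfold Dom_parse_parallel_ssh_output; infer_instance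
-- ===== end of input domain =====

-- B replaces A's single-pass current_host state machine by a pre-stripping pass plus
-- segment-at-a-time grouping (one whole header-delimited segment consumed per outer step);
-- same cost, alternative decomposition. Equality of return values proved on all inputs.

-- ===== PORT A =====
-- A-side helper: the body of A's `for line in output.splitlines()` loop.
def pvAStep (st : PySem.Dict String (List String) × Option String) (line : String) :
    PySem.Dict String (List String) × Option String :=
  let ls := PySem.Str.strip line
  if ls = "" then st
  else if PySem.Str.startswith ls "[" && PySem.Str.isIn "SUCCESS" ls then
    -- parts = ls.split(); if parts: host = parts[-1]; …
    match PySem.List.pyGet? (PySem.Str.split₀ ls) (-1) with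
    | some host => (st.1.setdefault host [], some host)
    | none => st
  else
    match st.2 with
    | some h =>
      if !PySem.Str.startswith ls "[" then (st.1.modify h [] (· ++ [ls]), some h)
      else st
    | none => st

def parse_parallel_ssh_output (output : String) : List (String × List String) :=
  let st := (PySem.Str.splitlines output).foldl pvAStep (PySem.Dict.empty, none)
  st.1.items

-- ===== PORT B =====
-- B-side helpers (transliterating Source B's `_is_header` and its two while loops)
def pvIsHeader (ls : String) : Bool :=
  PySem.Str.startswith ls "[" && PySem.Str.isIn "SUCCESS" ls

-- the inner `while rest and not _is_header(rest[0])` loop: returns (body, remaining rest)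
def pvCollect : List String → List String × List String
  | [] => ([], [])
  | ls :: rest =>
    if pvIsHeader ls then ([], ls :: rest)
    else
      let (b, r) := pvCollect rest
      ((if !PySem.Str.startswith ls "[" then ls :: b else b), r)

theorem pvCollect_snd_length_le : ∀ (l : List String), (pvCollect l).2.length ≤ l.length := by
  intro l
  induction l with
  | nil => simp [pvCollect]
  | cons ls rest ih =>
    by_cases h : pvIsHeader ls = true
    · simp [pvCollect, h]
    · simp [pvCollect, h]; omega

-- the outer `while rest` loop
def pvAltGo (rest : List String) (result : PySem.Dict String (List String)) :
    PySem.Dict String (List String) :=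
  match rest with
  | [] => result
  | ls :: rest' =>
    if pvIsHeader ls then
      match PySem.List.pyGet? (PySem.Str.split₀ ls) (-1) with
      | some host =>
        let result := result.setdefault host []
        let br := pvCollect rest'
        pvAltGo br.2 (result.modify host [] (· ++ br.1))
      | none => result   -- unreachable: a header starts with '[', so ls.split() is nonempty
    else pvAltGo rest' result
termination_by rest.length
decreasing_by
  · have := pvCollect_snd_length_le rest'
    simp; omega
  · simp

def parse_parallel_ssh_output_alt (output : String) : List (String × List String) :=
  let lines := ((PySem.Str.splitlines output).map PySem.Str.strip).filter (fun ls => ls ≠ "")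
  (pvAltGo lines PySem.Dict.empty).items

-- ===== PRECONDITION & SPEC =====
def Spec_parse_parallel_ssh_output (output : String) (out : List (String × List String)) : Prop := out = parse_parallel_ssh_output_alt output
instance (output : String) (out : List (String × List String)) : Decidable (Spec_parse_parallel_ssh_output output out) := by unfold Spec_parse_parallel_ssh_output; infer_instance

-- ===== CLAIM (what is proved, stated in full; the proofs are below) =====
def Claim_equal_parse_parallel_ssh_output : Prop := ∀ (output : String), Dom_parse_parallel_ssh_output output → Spec_parse_parallel_ssh_output output (parse_parallel_ssh_output output)

-- ===== LEMMAS AND PROOFS =====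

-- A's loop body after the strip/empty-line test, on an already stripped nonempty line
def pvCoreStep (st : PySem.Dict String (List String) × Option String) (ls : String) :
    PySem.Dict String (List String) × Option String :=
  if pvIsHeader ls then
    match PySem.List.pyGet? (PySem.Str.split₀ ls) (-1) with
    | some host => (st.1.setdefault host [], some host)
    | none => st
  else
    match st.2 with
    | some h =>
      if !PySem.Str.startswith ls "[" then (st.1.modify h [] (· ++ [ls]), some h)
      else st
    | none => st

theorem pvAStep_eq (st : PySem.Dict String (List String) × Option String) (line : String) :
    pvAStep st line =
      if PySem.Str.strip line = "" then st else pvCoreStep st (PySem.Str.strip line) := rfl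

-- A's raw fold is the core fold over the stripped nonempty lines
theorem pvFoldA_eq_core (raw : List String) (st : PySem.Dict String (List String) × Option String) :
    raw.foldl pvAStep st
      = ((raw.map PySem.Str.strip).filter (fun ls => ls ≠ "")).foldl pvCoreStep st := by
  induction raw generalizing st with
  | nil => rfl
  | cons x rest ih =>
    rw [List.foldl_cons, List.map_cons, List.filter_cons, pvAStep_eq]
    by_cases hx : PySem.Str.strip x = "" <;> simp [hx, ih]

theorem pvGo_ne_nil : ∀ (s cur : List Char) (acc : List (List Char)),
    cur ≠ [] ∨ acc ≠ [] → PySem.Chars.split₀.go s cur acc ≠ [] := by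
  intro s
  induction s with
  | nil =>
    intro cur acc h
    by_cases hc : cur = []
    · subst hc
      have hacc : acc ≠ [] := by tauto
      simp [PySem.Chars.split₀.go, hacc]
    · simp [PySem.Chars.split₀.go, hc]
  | cons c rest ih =>
    intro cur acc h
    by_cases hs : PySem.Chars.isspace c = true
    · by_cases hc : cur = []
      · subst hc
        have hacc : acc ≠ [] := by tauto
        simpa [PySem.Chars.split₀.go, hs] using ih [] acc (Or.inr hacc)
      · simpa [PySem.Chars.split₀.go, hs, hc] using ih [] (cur.reverse :: acc) (Or.inr (by simp))
    · simpa [PySem.Chars.split₀.go, hs] using ih (c :: cur) acc (Or.inl (by simp))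

-- a line starting with '[' splits into at least one word
theorem pvSplit_ne_nil (s : String) (h : PySem.Str.startswith s "[" = true) :
    PySem.Str.split₀ s ≠ [] := by
  have h' : List.isPrefixOf ['['] s.toList = true := by
    simpa [PySem.Str.startswith, PySem.Chars.startswith] using h
  cases hsl : s.toList with
  | nil => rw [hsl] at h'; simp [List.isPrefixOf] at h'
  | cons a t =>
    rw [hsl] at h'
    have ha : a = '[' := by
      have := h'; simp [List.isPrefixOf] at this; exact this.symm
    subst ha
    have : PySem.Chars.split₀ s.toList ≠ [] := by
      rw [hsl]
      show PySem.Chars.split₀.go ('[' :: t) [] [] ≠ []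
      simpa [PySem.Chars.split₀.go, show PySem.Chars.isspace '[' = false from rfl]
        using pvGo_ne_nil t ['['] [] (Or.inl (by simp))
    simpa [PySem.Str.split₀] using this

theorem pvPyGet_last_some {α : Type} (xs : List α) (h : xs ≠ []) :
    ∃ y, PySem.List.pyGet? xs (-1) = some y := by
  cases xs with
  | nil => exact absurd rfl h
  | cons a t =>
    have hidx : PySem.List.pyIdx? (a :: t).length (-1) = some t.length := by
      simp only [PySem.List.pyIdx?, List.length_cons]
      rw [if_neg (by omega), if_pos (by push_cast; omega)]
      norm_num
    refine ⟨(a :: t)[t.length], ?_⟩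
    rw [PySem.List.pyGet?, hidx]
    simp

theorem pvNodup_setdefault (d : PySem.Dict String (List String)) (k : String) (v : List String)
    (hd : d.keys.Nodup) : (d.setdefault k v).keys.Nodup := by
  rw [PySem.Dict.keys_setdefault]
  split_ifs with hc
  · exact hd
  · have hk : k ∉ d.keys := fun hk => hc ((PySem.Dict.contains_iff_mem_keys d k).mpr hk)
    simp [List.nodup_append, hd]
    intro a ha hak
    exact hk (hak ▸ ha)

-- inserting back the present value is a no-op (on Nodup keys)
theorem pvInsert_getD_self (d : PySem.Dict String (List String)) (h : String)
    (hd : d.keys.Nodup) (hc : d.contains h = true) :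
    d.insert h (d.getD h []) = d := by
  apply PySem.Dict.ext
  rw [PySem.Dict.items_insert_of_contains d _ hc]
  have : ∀ p ∈ d.items, (if (p.1 == h) = true then (h, d.getD h []) else p) = p := by
    intro p hp
    obtain ⟨k, v⟩ := p
    by_cases hph : (k == h) = true
    · have hph' : k = h := by simpa using hph
      subst hph'
      have hv : d.getD k [] = v := PySem.Dict.getD_of_mem_items d hp hd []
      simp [hv]
    · simp [hph]
  rw [List.map_congr_left this]
  simp

theorem pvModify_nil (d : PySem.Dict String (List String)) (h : String)
    (hd : d.keys.Nodup) (hc : d.contains h = true) :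
    d.modify h [] (· ++ ([] : List String)) = d := by
  simp only [PySem.Dict.modify, List.append_nil]
  exact pvInsert_getD_self d h hd hc

theorem pvModify_comp (d : PySem.Dict String (List String)) (h x : String) (b : List String) :
    (d.modify h [] (· ++ [x])).modify h [] (· ++ b) = d.modify h [] (· ++ (x :: b)) := by
  simp only [PySem.Dict.modify, PySem.Dict.getD_insert_self]
  rw [PySem.Dict.insert_insert_self]
  simp

theorem pvNodup_modify (d : PySem.Dict String (List String)) (h : String) (f : List String → List String)
    (hd : d.keys.Nodup) : (d.modify h [] f).keys.Nodup := by
  simp only [PySem.Dict.modify]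
  exact PySem.Dict.nodup_keys_insert d h _ hd

-- ===== MAIN INDUCTION =====
theorem pvMain : ∀ (ls : List String),
    (∀ d : PySem.Dict String (List String), d.keys.Nodup →
      (ls.foldl pvCoreStep (d, none)).1 = pvAltGo ls d) ∧
    (∀ (d : PySem.Dict String (List String)) (h : String), d.keys.Nodup → d.contains h = true →
      (ls.foldl pvCoreStep (d, some h)).1
        = pvAltGo (pvCollect ls).2 (d.modify h [] (· ++ (pvCollect ls).1))) := by
  intro ls
  induction ls with
  | nil =>
    constructor
    · intro d _
      simp [pvAltGo]
    · intro d h hd hc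
      simpa [pvCollect, pvAltGo] using (pvModify_nil d h hd hc).symm
  | cons x rest ih =>
    constructor
    · intro d hd
      by_cases hx : pvIsHeader x = true
      · obtain ⟨host, hhost⟩ :=
          pvPyGet_last_some (PySem.Str.split₀ x)
            (pvSplit_ne_nil x (by simp [pvIsHeader] at hx; exact hx.1))
        rw [List.foldl_cons]
        have hstep : pvCoreStep (d, none) x = (d.setdefault host [], some host) := by
          simp [pvCoreStep, hx, hhost]
        rw [hstep, pvAltGo]
        simp only [hx, if_pos, hhost]
        exact ih.2 (d.setdefault host []) host (pvNodup_setdefault d host [] hd)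
          (by simp [PySem.Dict.contains_setdefault])
      · rw [List.foldl_cons]
        have hstep : pvCoreStep (d, none) x = (d, none) := by
          simp [pvCoreStep, hx]
        rw [hstep, pvAltGo]
        simp only [hx]
        exact ih.1 d hd
    · intro d h hd hc
      by_cases hx : pvIsHeader x = true
      · obtain ⟨host, hhost⟩ :=
          pvPyGet_last_some (PySem.Str.split₀ x)
            (pvSplit_ne_nil x (by simp [pvIsHeader] at hx; exact hx.1))
        rw [List.foldl_cons]
        have hstep : pvCoreStep (d, some h) x = (d.setdefault host [], some host) := by
          simp [pvCoreStep, hx, hhost]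
        rw [hstep]
        have hcoll : pvCollect (x :: rest) = ([], x :: rest) := by
          simp [pvCollect, hx]
        rw [hcoll]
        simp only
        rw [pvModify_nil d h hd hc, pvAltGo]
        simp only [hx, if_pos, hhost]
        exact ih.2 (d.setdefault host []) host (pvNodup_setdefault d host [] hd)
          (by simp [PySem.Dict.contains_setdefault])
      · have hcoll : pvCollect (x :: rest)
            = ((if !PySem.Str.startswith x "[" then x :: (pvCollect rest).1 else (pvCollect rest).1),
               (pvCollect rest).2) := by
          simp [pvCollect, hx]
        by_cases hb : PySem.Str.startswith x "[" = true
        · have hbC : PySem.Chars.startswith x.toList ['['] = true := by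
            simpa [PySem.Str.startswith] using hb
          rw [List.foldl_cons]
          have hstep : pvCoreStep (d, some h) x = (d, some h) := by
            simp [pvCoreStep, hx, hbC]
          rw [hstep, hcoll]
          simp only [hb, Bool.not_true, if_neg (by simp : ¬((false : Bool) = true))]
          exact ih.2 d h hd hc
        · have hbC : PySem.Chars.startswith x.toList ['['] = false := by
            have := hb; simp [PySem.Str.startswith] at this; simpa using this
          rw [List.foldl_cons]
          have hstep : pvCoreStep (d, some h) x = (d.modify h [] (· ++ [x]), some h) := by
            simp [pvCoreStep, hx, hbC]
          rw [hstep, hcoll]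
          have hb' : (!PySem.Str.startswith x "[") = true := by
            simp [PySem.Str.startswith, hbC]
          simp only [hb', if_pos]
          rw [ih.2 (d.modify h [] (· ++ [x])) h (pvNodup_modify d h _ hd)
            (by simp [PySem.Dict.contains_modify]), pvModify_comp]

-- ===== VERDICT (by name: the statement is the Claim_ definition above) =====
theorem parse_parallel_ssh_output_spec : Claim_equal_parse_parallel_ssh_output := by
  intro output _
  unfold Spec_parse_parallel_ssh_output parse_parallel_ssh_output parse_parallel_ssh_output_alt
  simp only [pvFoldA_eq_core]
  rw [(pvMain _).1 _ (by simp [PySem.Dict.keys_empty])]
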